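-- pv_equiv track=rewrite | github.com/adrian-valente/hippollm | src/helpers.py | choice_selection
-- ===== SOURCE A (Python) =====
-- from typing import List
--
-- def choice_selection(answer: str, choices: List[str]) -> str:
--     """See if an answer corresponds to one among a list of choices, even if the text contains
--     more information."""
--     answer = answer.strip().lower()
--     if answer.startswith("none"):
--         return None
--     for choice in choices:
--         if answer.startswith(str(choice).lower()):
--             return choice
--     # Second pass (robustness)
--     for choice in choices:
--         if str(choice).lower() in answer:
--             return choice
--     return None
-- ===== SOURCE B (Python) =====
-- def choice_selection(answer, choices):
--     answer = answer.strip().lower()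
--     if answer.startswith("none"):
--         return None
--     fallback = None
--     for choice in choices:
--         c = str(choice).lower()
--         if answer.startswith(c):
--             return choice
--         if fallback is None and c in answer:
--             fallback = choice
--     return fallback
-- ===== Notes on version B (the rewrite author's own statement) =====
-- stated objective: alternative
-- what changed: A's two sequential scans over choices (prefix pass, then substring pass) are merged into one stateful scan that returns a prefix match immediately and keeps the first substring match as a pending fallback.
import Mathlib
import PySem

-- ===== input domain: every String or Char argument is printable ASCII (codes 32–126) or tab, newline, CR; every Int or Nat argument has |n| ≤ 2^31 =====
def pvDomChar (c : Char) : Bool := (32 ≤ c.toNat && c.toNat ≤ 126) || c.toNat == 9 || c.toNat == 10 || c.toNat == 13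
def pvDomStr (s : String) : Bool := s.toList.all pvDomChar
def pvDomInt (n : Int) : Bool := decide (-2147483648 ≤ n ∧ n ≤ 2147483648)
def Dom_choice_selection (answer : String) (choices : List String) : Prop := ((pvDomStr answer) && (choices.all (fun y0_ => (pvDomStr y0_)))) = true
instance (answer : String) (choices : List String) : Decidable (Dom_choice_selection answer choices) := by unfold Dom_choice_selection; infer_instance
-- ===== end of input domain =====

-- B merges A's two sequential scans over choices into one stateful scan with a pending substring fallback (alternative decomposition, same cost).


-- ===== PORT A =====
-- first pass: 'for choice in choices: if answer.startswith(str(choice).lower()): return choice'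
def csFirstPass (a : String) : List String → Option String
  | [] => none
  | c :: t => if PySem.Str.startswith a (PySem.Str.lower c) then some c else csFirstPass a t

-- second pass: 'for choice in choices: if str(choice).lower() in answer: return choice'
def csSecondPass (a : String) : List String → Option String
  | [] => none
  | c :: t => if PySem.Str.isIn (PySem.Str.lower c) a then some c else csSecondPass a t

def choice_selection (answer : String) (choices : List String) : Option String :=
  let a := PySem.Str.lower (PySem.Str.strip answer)
  if PySem.Str.startswith a "none" then none
  else
    match csFirstPass a choices with
    | some c => some c
    | none =>
      match csSecondPass a choices with
      | some c => some c
      | none => none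

-- ===== PORT B =====
-- single loop carrying the pending fallback
def csLoop (a : String) : List String → Option String → Option String
  | [], fb => fb
  | c :: t, fb =>
    let lc := PySem.Str.lower c
    if PySem.Str.startswith a lc then some c
    else if fb.isNone && PySem.Str.isIn lc a then csLoop a t (some c)
    else csLoop a t fb

def choice_selection_alt (answer : String) (choices : List String) : Option String :=
  let a := PySem.Str.lower (PySem.Str.strip answer)
  if PySem.Str.startswith a "none" then none
  else csLoop a choices none

-- ===== PRECONDITION & SPEC =====
def Spec_choice_selection (answer : String) (choices : List String) (out : Option String) : Prop := out = choice_selection_alt answer choices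
instance (answer : String) (choices : List String) (out : Option String) : Decidable (Spec_choice_selection answer choices out) := by unfold Spec_choice_selection; infer_instance

-- ===== CLAIM (what is proved, stated in full; the proofs are below) =====
def Claim_equal_choice_selection : Prop := ∀ (answer : String) (choices : List String), Dom_choice_selection answer choices → Spec_choice_selection answer choices (choice_selection answer choices)

-- ===== LEMMAS AND PROOFS =====
-- loop invariant: the one-pass loop equals first-pass-then-(fallback-then-second-pass)
theorem csLoop_eq (a : String) (cs : List String) (fb : Option String) :
    csLoop a cs fb =
      match csFirstPass a cs with
      | some c => some c
      | none => match fb with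
        | some x => some x
        | none => csSecondPass a cs := by
  induction cs generalizing fb with
  | nil => cases fb <;> rfl
  | cons c t ih =>
    simp only [csLoop, csFirstPass, csSecondPass]
    by_cases h1 : PySem.Str.startswith a (PySem.Str.lower c) = true
    · rw [if_pos h1, if_pos h1]
    · rw [if_neg h1, if_neg h1]
      cases fb with
      | some x =>
        simp only [Option.isNone_some, Bool.false_and, Bool.false_eq_true, if_false, ih]
      | none =>
        simp only [Option.isNone_none, Bool.true_and]
        by_cases h2 : PySem.Str.isIn (PySem.Str.lower c) a = true
        · rw [if_pos h2, if_pos h2, ih]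
        · rw [if_neg h2, if_neg h2, ih]

-- ===== VERDICT (by name: the statement is the Claim_ definition above) =====
theorem choice_selection_spec : Claim_equal_choice_selection := by
  intro answer choices _
  unfold Spec_choice_selection choice_selection choice_selection_alt
  by_cases h : PySem.Str.startswith (PySem.Str.lower (PySem.Str.strip answer)) "none" = true
  · rw [if_pos h, if_pos h]
  · rw [if_neg h, if_neg h, csLoop_eq]
    cases h1 : csFirstPass (PySem.Str.lower (PySem.Str.strip answer)) choices with
    | some c => rfl
    | none =>
      cases h2 : csSecondPass (PySem.Str.lower (PySem.Str.strip answer)) choices <;> rfl
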